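-- pv_equiv track=rewrite | github.com/Kamilbur/ADPTO | lab01-Vertex-Cover/main.py | VC_2k_recursion
-- ===== SOURCE A (Python) =====
-- def VC_2k_recursion(E, k, S):
--     # find not covered edge
--     free_edge = None
--     idx = None
--     for i, e in enumerate(E):
--         if e[0] not in S and e[1] not in S:
--             free_edge = e
--             idx = i
--             break
--
--     if free_edge is None:
--         return S
--
--     if k == 0:
--         return None
--
--     E = E[idx:]
--
--     u, v = free_edge
--     S1 = VC_2k_recursion(E, k-1, S.union({u}))
--     if S1:
--         return S1
--     S2 = VC_2k_recursion(E, k-1, S.union({v}))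
--
--     return S2
-- ===== SOURCE B (Python) =====
-- def VC_2k_recursion(E, k, S):
--     # Iterative DFS with an explicit frame stack; uncovered-edge search by
--     # structurally consuming the covered prefix instead of enumerate+slice.
--     stack = [(E, k, S)]
--     while stack:
--         edges, budget, cover = stack.pop()
--         while edges and (edges[0][0] in cover or edges[0][1] in cover):
--             edges = edges[1:]
--         if not edges:
--             return cover
--         if budget == 0:
--             continue
--         u, v = edges[0]
--         stack.append((edges, budget - 1, cover | {v}))
--         stack.append((edges, budget - 1, cover | {u}))
--     return None
-- ===== Notes on version B (the rewrite author's own statement) =====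
-- stated objective: alternative
-- what changed: Replaces A's branching recursion by an iterative DFS over an explicit LIFO stack of (edges, budget, cover) frames, and replaces A's enumerate-then-slice scan for an uncovered edge by structurally consuming the covered prefix of the edge list; frames are popped and either returned, pruned at budget 0, or expanded into two branch frames pushed v-first so the u-branch is explored first.
import Mathlib
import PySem

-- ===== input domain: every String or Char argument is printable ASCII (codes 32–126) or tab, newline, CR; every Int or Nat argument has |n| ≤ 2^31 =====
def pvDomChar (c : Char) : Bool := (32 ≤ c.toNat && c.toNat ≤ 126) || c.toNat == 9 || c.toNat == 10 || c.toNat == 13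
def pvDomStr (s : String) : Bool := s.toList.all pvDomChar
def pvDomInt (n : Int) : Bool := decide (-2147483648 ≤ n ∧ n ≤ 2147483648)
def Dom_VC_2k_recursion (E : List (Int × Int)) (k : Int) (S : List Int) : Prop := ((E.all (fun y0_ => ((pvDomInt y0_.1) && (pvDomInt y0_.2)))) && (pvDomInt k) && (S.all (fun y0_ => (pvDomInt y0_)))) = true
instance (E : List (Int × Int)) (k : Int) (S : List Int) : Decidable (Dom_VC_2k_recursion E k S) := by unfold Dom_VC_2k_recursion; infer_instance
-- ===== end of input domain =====

-- B replaces A's branching recursion by an iterative DFS over an explicit frame stack, with the covered prefix of the edge list consumed structurally instead of A's enumerate+slice scan; equivalence of return values is proved.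

-- vertices of E not yet in S: the termination measure of both searches
def pvMeas (E : List (Int × Int)) (S : List Int) : Nat :=
  ((E.flatMap fun e => [e.1, e.2]).toFinset \ S.toFinset).card

theorem pvMeas_lt_of_mem (E L : List (Int × Int)) (S : List Int) (u v x : Int)
    (hsub : ∀ e, e ∈ L → e ∈ E) (hmem : (u, v) ∈ L) (hu : u ∉ S) (hv : v ∉ S)
    (hx : x = u ∨ x = v) :
    pvMeas L (PySem.Set.add S x) < pvMeas E S := by
  have hxS : x ∉ S := by rcases hx with rfl | rfl <;> assumption
  have hmemE : (u, v) ∈ E := hsub _ hmem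
  apply Finset.card_lt_card
  constructor
  · intro y hy
    simp only [Finset.mem_sdiff, List.mem_toFinset, List.mem_flatMap] at hy ⊢
    obtain ⟨⟨e, he, hye⟩, hyS⟩ := hy
    refine ⟨⟨e, hsub _ he, hye⟩, fun hc => hyS ?_⟩
    exact (PySem.Set.mem_add S x y).mpr (Or.inl hc)
  · intro hba
    have hxIn : x ∈ (L.flatMap fun e => [e.1, e.2]).toFinset \ (PySem.Set.add S x).toFinset := by
      apply hba
      simp only [Finset.mem_sdiff, List.mem_toFinset, List.mem_flatMap]
      refine ⟨⟨(u, v), hmemE, ?_⟩, hxS⟩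
      rcases hx with rfl | rfl <;> simp
    have : x ∈ PySem.Set.add S x := (PySem.Set.mem_add S x x).mpr (Or.inr rfl)
    simp only [Finset.mem_sdiff, List.mem_toFinset] at hxIn
    exact hxIn.2 this

-- ===== PORT A =====
-- the 'for i, e in enumerate(E): if e[0] not in S and e[1] not in S: idx = i; break' scan of A
def pvFindFree (E : List (Int × Int)) (S : List Int) (i : Nat) : Option (Nat × (Int × Int)) :=
  match E with
  | [] => none
  | e :: rest =>
      if e.1 ∉ S ∧ e.2 ∉ S then some (i, e) else pvFindFree rest S (i + 1)

theorem pvFindFree_spec : ∀ (E : List (Int × Int)) (S : List Int) (i idx : Nat) (u v : Int),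
    pvFindFree E S i = some (idx, (u, v)) →
    i ≤ idx ∧ (∃ tl, E.drop (idx - i) = (u, v) :: tl) ∧ u ∉ S ∧ v ∉ S := by
  intro E
  induction E with
  | nil => intro S i idx u v h; simp [pvFindFree] at h
  | cons e rest ih =>
      intro S i idx u v h
      by_cases hc : e.1 ∉ S ∧ e.2 ∉ S
      · simp [pvFindFree, hc] at h
        obtain ⟨h1, h2, h3⟩ := h
        subst h1
        refine ⟨le_refl _, ⟨rest, ?_⟩, ?_, ?_⟩ <;> simp_all
      · simp [pvFindFree, hc] at h
        obtain ⟨h1, ⟨tl, h2⟩, h3, h4⟩ := ih S (i + 1) idx u v h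
        refine ⟨by omega, ⟨tl, ?_⟩, h3, h4⟩
        have : idx - i = (idx - (i + 1)) + 1 := by omega
        rw [this, List.drop_succ_cons] at *
        exact h2

def VC_2k_recursion (E : List (Int × Int)) (k : Int) (S : List Int) : Option (List Int) :=
  match h : pvFindFree E S 0 with
  | none => some S
  | some (idx, (u, v)) =>
      if k = 0 then none
      else
        let E' := E.drop idx
        let S1 := VC_2k_recursion E' (k - 1) (PySem.Set.add S u)
        if (match S1 with | none => false | some l => !l.isEmpty) then S1
        else VC_2k_recursion E' (k - 1) (PySem.Set.add S v)
termination_by pvMeas E S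
decreasing_by
  · have hs := pvFindFree_spec E S 0 idx u v h
    obtain ⟨_, ⟨tl, htl⟩, hu, hv⟩ := hs
    simp only [Nat.sub_zero] at htl
    exact pvMeas_lt_of_mem E (E.drop idx) S u v u (fun e he => List.mem_of_mem_drop he)
      (htl ▸ List.mem_cons_self ..) hu hv (Or.inl rfl)
  · have hs := pvFindFree_spec E S 0 idx u v h
    obtain ⟨_, ⟨tl, htl⟩, hu, hv⟩ := hs
    simp only [Nat.sub_zero] at htl
    exact pvMeas_lt_of_mem E (E.drop idx) S u v v (fun e he => List.mem_of_mem_drop he)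
      (htl ▸ List.mem_cons_self ..) hu hv (Or.inr rfl)

-- ===== PORT B =====
-- B's inner 'while edges and (edges[0][0] in cover or edges[0][1] in cover): edges = edges[1:]'
def pvSkip (E : List (Int × Int)) (S : List Int) : List (Int × Int) :=
  match E with
  | [] => []
  | e :: rest => if e.1 ∈ S ∨ e.2 ∈ S then pvSkip rest S else e :: rest

theorem pvSkip_subset : ∀ (E : List (Int × Int)) (S : List Int) (e : Int × Int),
    e ∈ pvSkip E S → e ∈ E := by
  intro E
  induction E with
  | nil => intro S e h; simpa [pvSkip] using h
  | cons a rest ih =>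
      intro S e h
      simp only [pvSkip] at h
      split at h
      · exact List.mem_cons_of_mem a (ih S e h)
      · exact h

theorem pvSkip_head_free : ∀ (E : List (Int × Int)) (S : List Int) (u v : Int)
    (rest : List (Int × Int)), pvSkip E S = (u, v) :: rest → u ∉ S ∧ v ∉ S := by
  intro E
  induction E with
  | nil => intro S u v rest h; simp [pvSkip] at h
  | cons a tail ih =>
      intro S u v rest h
      simp only [pvSkip] at h
      split at h
      · exact ih S u v rest h
      · rename_i hc
        push_neg at hc
        obtain ⟨h1, -⟩ := List.cons.injEq .. ▸ h
        rw [h1] at hc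
        simpa using hc

-- B's 'while stack:' loop; the head of the list is the top of the stack
def pvStackMeas (stack : List ((List (Int × Int)) × Int × List Int)) : Nat :=
  (stack.map fun f => 3 ^ pvMeas f.1 f.2.2).sum

def pvRun (stack : List ((List (Int × Int)) × Int × List Int)) : Option (List Int) :=
  match stack with
  | [] => none
  | (E, k, S) :: fs =>
      match h : pvSkip E S with
      | [] => some S
      | (u, v) :: rest =>
          if k = 0 then pvRun fs
          else pvRun (((u, v) :: rest, k - 1, PySem.Set.add S u) ::
                      ((u, v) :: rest, k - 1, PySem.Set.add S v) :: fs)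
termination_by pvStackMeas stack
decreasing_by
  · simp [pvStackMeas]
  · have hfree := pvSkip_head_free E S u v rest h
    have hmem : (u, v) ∈ (u, v) :: rest := List.mem_cons_self ..
    have hsub : ∀ e, e ∈ (u, v) :: rest → e ∈ E := fun e he => pvSkip_subset E S e (h ▸ he)
    have h1 := pvMeas_lt_of_mem E ((u, v) :: rest) S u v u hsub hmem hfree.1 hfree.2 (Or.inl rfl)
    have h2 := pvMeas_lt_of_mem E ((u, v) :: rest) S u v v hsub hmem hfree.1 hfree.2 (Or.inr rfl)
    simp only [pvStackMeas, List.map_cons, List.sum_cons]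
    have e1 : 3 ^ pvMeas ((u, v) :: rest) (PySem.Set.add S u) ≤ 3 ^ (pvMeas E S - 1) :=
      Nat.pow_le_pow_right (by omega) (by omega)
    have e2 : 3 ^ pvMeas ((u, v) :: rest) (PySem.Set.add S v) ≤ 3 ^ (pvMeas E S - 1) :=
      Nat.pow_le_pow_right (by omega) (by omega)
    have hpos : 0 < 3 ^ (pvMeas E S - 1) := Nat.pow_pos (by omega)
    have e3 : 3 ^ (pvMeas E S - 1) * 3 ≤ 3 ^ pvMeas E S := by
      rw [← pow_succ]
      exact Nat.pow_le_pow_right (by omega) (by omega)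
    omega

def VC_2k_recursion_alt (E : List (Int × Int)) (k : Int) (S : List Int) : Option (List Int) :=
  pvRun [(E, k, S)]

-- ===== PRECONDITION & SPEC =====
def Spec_VC_2k_recursion (E : List (Int × Int)) (k : Int) (S : List Int) (out : Option (List Int)) : Prop := out = VC_2k_recursion_alt E k S
instance (E : List (Int × Int)) (k : Int) (S : List Int) (out : Option (List Int)) : Decidable (Spec_VC_2k_recursion E k S out) := by unfold Spec_VC_2k_recursion; infer_instance

-- ===== CLAIM (what is proved, stated in full; the proofs are below) =====
def Claim_equal_VC_2k_recursion : Prop := ∀ (E : List (Int × Int)) (k : Int) (S : List Int), Dom_VC_2k_recursion E k S → Spec_VC_2k_recursion E k S (VC_2k_recursion E k S)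

-- ===== LEMMAS AND PROOFS =====

-- pvSkip agrees with A's indexed scan: none ↔ everything covered, some idx ↔ drop idx
theorem pvSkip_of_find_none : ∀ (E : List (Int × Int)) (S : List Int) (i : Nat),
    pvFindFree E S i = none → pvSkip E S = [] := by
  intro E
  induction E with
  | nil => intro S i _; simp [pvSkip]
  | cons e rest ih =>
      intro S i h
      by_cases hc : e.1 ∉ S ∧ e.2 ∉ S
      · simp [pvFindFree, hc] at h
      · simp only [pvFindFree, if_neg hc] at h
        have : e.1 ∈ S ∨ e.2 ∈ S := by tauto
        simp only [pvSkip, if_pos this]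
        exact ih S (i + 1) h

theorem pvSkip_of_find_some : ∀ (E : List (Int × Int)) (S : List Int) (i idx : Nat) (u v : Int),
    pvFindFree E S i = some (idx, (u, v)) → pvSkip E S = E.drop (idx - i) := by
  intro E
  induction E with
  | nil => intro S i idx u v h; simp [pvFindFree] at h
  | cons e rest ih =>
      intro S i idx u v h
      obtain ⟨a, b⟩ := e
      by_cases hc : a ∉ S ∧ b ∉ S
      · simp [pvFindFree, hc] at h
        obtain ⟨h1, h2, h3⟩ := h
        subst h1
        have hns : ¬ (a ∈ S ∨ b ∈ S) := by tauto
        simp [pvSkip, hns]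
      · simp only [pvFindFree, if_neg hc] at h
        have hle := (pvFindFree_spec rest S (i + 1) idx u v h).1
        have : a ∈ S ∨ b ∈ S := by tauto
        simp only [pvSkip, if_pos this]
        rw [ih S (i + 1) idx u v h]
        have hstep : idx - i = (idx - (i + 1)) + 1 := by omega
        rw [hstep, List.drop_succ_cons]

theorem pvAdd_ne_nil (S : List Int) (x : Int) : PySem.Set.add S x ≠ [] := by
  simp only [PySem.Set.add]
  split
  · rename_i h; intro hnil; subst hnil; simp at h
  · simp

theorem pvAdd_le_len (S : List Int) (x : Int) : S.length ≤ (PySem.Set.add S x).length := by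
  simp only [PySem.Set.add]; split <;> simp

-- the defining equation of A's port with a plain (non-dependent) match, convenient for rewriting
theorem pvA_eq (E : List (Int × Int)) (k : Int) (S : List Int) :
    VC_2k_recursion E k S =
      match pvFindFree E S 0 with
      | none => some S
      | some (idx, (u, v)) =>
          if k = 0 then none
          else
            if (match VC_2k_recursion (E.drop idx) (k - 1) (PySem.Set.add S u) with
                | none => false
                | some l => !l.isEmpty) then
              VC_2k_recursion (E.drop idx) (k - 1) (PySem.Set.add S u)
            else VC_2k_recursion (E.drop idx) (k - 1) (PySem.Set.add S v) := by
  rw [VC_2k_recursion]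
  split <;> rename_i heq <;> simp only [heq]

-- the defining equation of B's loop with a plain match
theorem pvRun_eq (E : List (Int × Int)) (k : Int) (S : List Int)
    (fs : List ((List (Int × Int)) × Int × List Int)) :
    pvRun ((E, k, S) :: fs) =
      match pvSkip E S with
      | [] => some S
      | (u, v) :: rest =>
          if k = 0 then pvRun fs
          else pvRun (((u, v) :: rest, k - 1, PySem.Set.add S u) ::
                      ((u, v) :: rest, k - 1, PySem.Set.add S v) :: fs) := by
  rw [pvRun]
  split <;> rename_i heq <;> simp only [heq]

-- every set A returns extends the set it was called with; below the top call it is nonempty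
theorem pvA_length (E : List (Int × Int)) (k : Int) (S : List Int) :
    ∀ l, VC_2k_recursion E k S = some l → S.length ≤ l.length := by
  induction E, k, S using VC_2k_recursion.induct with
  | case1 E k S hfind =>
      intro l hl
      rw [pvA_eq] at hl
      simp only [hfind] at hl
      injection hl with h
      subst h; exact le_refl _
  | case2 E S idx u v hfind =>
      intro l hl
      rw [pvA_eq] at hl
      simp [hfind] at hl
  | case3 E k S idx u v hfind hk E' S1 htruthy ih =>
      intro l hl
      rw [pvA_eq] at hl
      simp only [hfind, if_neg hk] at hl
      rw [if_pos htruthy] at hl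
      exact le_trans (pvAdd_le_len S u) (ih l hl)
  | case4 E k S idx u v hfind hk E' S1 htruthy ihu ihv =>
      intro l hl
      rw [pvA_eq] at hl
      simp only [hfind, if_neg hk] at hl
      rw [if_neg htruthy] at hl
      exact le_trans (pvAdd_le_len S v) (ihv l hl)

-- the value of B's stack loop: the first success of A over the frames, in order
def pvFold (stack : List ((List (Int × Int)) × Int × List Int)) : Option (List Int) :=
  stack.foldr (fun f acc =>
    match VC_2k_recursion f.1 f.2.1 f.2.2 with
    | some l => some l
    | none => acc) none

theorem pvSkip_cons_find (E : List (Int × Int)) (S : List Int) (u v : Int)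
    (rest : List (Int × Int)) (h : pvSkip E S = (u, v) :: rest) :
    ∃ idx, pvFindFree E S 0 = some (idx, (u, v)) ∧ E.drop idx = (u, v) :: rest := by
  cases hf : pvFindFree E S 0 with
  | none => rw [pvSkip_of_find_none E S 0 hf] at h; simp at h
  | some p =>
      obtain ⟨idx, u', v'⟩ := p
      have hdr := pvSkip_of_find_some E S 0 idx u' v' hf
      simp only [Nat.sub_zero] at hdr
      obtain ⟨-, ⟨tl, htl⟩, -, -⟩ := pvFindFree_spec E S 0 idx u' v' hf
      simp only [Nat.sub_zero] at htl
      rw [h] at hdr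
      have hcomb : ((u', v') : Int × Int) :: tl = (u, v) :: rest := htl.symm.trans hdr.symm
      injection hcomb with h1 h2
      injection h1 with hu hv
      exact ⟨idx, by rw [hu, hv], hdr.symm⟩

theorem pvRun_eq_fold : ∀ (stack : List ((List (Int × Int)) × Int × List Int)),
    pvRun stack = pvFold stack := by
  intro stack
  induction stack using pvRun.induct with
  | case1 => simp [pvRun, pvFold]
  | case2 E k S fs hskip =>
      rw [pvRun_eq]
      simp only [hskip]
      have hfind : pvFindFree E S 0 = none := by
        cases hf : pvFindFree E S 0 with
        | none => rfl
        | some p =>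
            obtain ⟨idx, u, v⟩ := p
            have hdr := pvSkip_of_find_some E S 0 idx u v hf
            obtain ⟨-, ⟨tl, htl⟩, -, -⟩ := pvFindFree_spec E S 0 idx u v hf
            simp only [Nat.sub_zero] at hdr htl
            rw [htl] at hdr
            rw [hdr] at hskip
            simp at hskip
      simp only [pvFold, List.foldr_cons]
      rw [pvA_eq E k S]
      simp [hfind]
  | case3 E S fs u v rest hskip ih =>
      rw [pvRun_eq]
      simp only [hskip, if_pos]
      rw [ih]
      obtain ⟨idx, hfind, -⟩ := pvSkip_cons_find E S u v rest hskip
      simp only [pvFold, List.foldr_cons]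
      rw [pvA_eq E 0 S]
      simp [hfind]
  | case4 E k S fs u v rest hskip hk ih =>
      rw [pvRun_eq]
      simp only [hskip]
      rw [if_neg hk, ih]
      obtain ⟨idx, hfind, hdrop⟩ := pvSkip_cons_find E S u v rest hskip
      simp only [pvFold, List.foldr_cons]
      rw [pvA_eq E k S]
      simp only [hfind, if_neg hk, hdrop]
      cases hS1 : VC_2k_recursion ((u, v) :: rest) (k - 1) (PySem.Set.add S u) with
      | some l =>
          have hlen : 1 ≤ l.length := by
            have h1 := pvA_length ((u, v) :: rest) (k - 1) (PySem.Set.add S u) l hS1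
            have h2 : 0 < (PySem.Set.add S u).length :=
              List.length_pos_iff.mpr (pvAdd_ne_nil S u)
            omega
          have hne : l ≠ [] := by intro h; subst h; simp at hlen
          simp [hne]
      | none => simp

-- ===== VERDICT (by name: the statement is the Claim_ definition above) =====
theorem VC_2k_recursion_spec : Claim_equal_VC_2k_recursion := by
  intro E k S _
  unfold Spec_VC_2k_recursion VC_2k_recursion_alt
  rw [pvRun_eq_fold]
  simp only [pvFold, List.foldr_cons, List.foldr_nil]
  cases VC_2k_recursion E k S <;> rfl
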